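-- pv_equiv track=rewrite | github.com/QGarot/scuti-server-oldschool | src/utils/base_64_encoding.py | decode_int32
-- ===== SOURCE A (Python) =====
-- def decode_int32(bz_data) -> int:
--     """
--     :param bz_data:
--     :return:
--     """
--     i = 0
--     j = 0
--     for k in range(len(bz_data) - 1, -1, -1):
--         x = int(bz_data[k] - 64)
--         if j > 0:
--             x *= int(64 ** j)
--         i += x
--         j += 1
--     return i
-- ===== SOURCE B (Python) =====
-- def decode_int32(bz_data) -> int:
--     i = 0
--     for d in bz_data:
--         i = i * 64 + int(d - 64)
--     return i
-- ===== Notes on version B (the rewrite author's own statement) =====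
-- stated objective: simpler
-- what changed: Replaces the reversed-index loop with exponent counter and per-digit 64**j power by a single forward Horner pass (i = i*64 + (d-64)), removing the reversed range, the j counter and the power computation.
import Mathlib
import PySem

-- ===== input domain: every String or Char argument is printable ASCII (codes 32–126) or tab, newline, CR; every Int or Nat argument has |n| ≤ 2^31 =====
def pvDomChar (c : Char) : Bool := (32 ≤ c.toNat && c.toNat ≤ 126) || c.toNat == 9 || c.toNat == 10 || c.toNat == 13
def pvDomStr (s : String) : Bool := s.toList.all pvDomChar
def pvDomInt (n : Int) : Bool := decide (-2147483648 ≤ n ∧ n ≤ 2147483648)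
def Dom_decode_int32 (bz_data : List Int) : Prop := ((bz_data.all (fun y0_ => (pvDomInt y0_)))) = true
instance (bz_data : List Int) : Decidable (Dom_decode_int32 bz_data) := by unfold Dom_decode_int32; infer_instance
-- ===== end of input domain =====

-- B replaces A's reversed-index loop with its exponent counter and per-digit 64**j power
-- by a single forward Horner pass (i = i*64 + (d-64)); objective: simpler.

-- ===== PORT A =====
-- step for step: state (i, j); k runs over range(len(bz_data)-1, -1, -1); the index k is
-- always in range, so bz_data[k] is ported as pyGetD with default 0 (never taken);
-- int(64 ** j) is 64 ^ j.toNat, exact since j ≥ 0 throughout (starts at 0, only incremented).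
def decode_int32 (bz_data : List Int) : Int :=
  (((PySem.List.pyRange ((bz_data.length : Int) - 1) (-1) (-1)).foldl
    (fun (st : Int × Int) k =>
      let x := PySem.List.pyGetD bz_data k 0 - 64
      let x := if st.2 > 0 then x * 64 ^ st.2.toNat else x
      (st.1 + x, st.2 + 1)) ((0 : Int), (0 : Int)))).1

-- ===== PORT B =====
def decode_int32_alt (bz_data : List Int) : Int :=
  bz_data.foldl (fun i d => i * 64 + (d - 64)) 0

-- ===== PRECONDITION & SPEC =====
def Spec_decode_int32 (bz_data : List Int) (out : Int) : Prop := out = decode_int32_alt bz_data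
instance (bz_data : List Int) (out : Int) : Decidable (Spec_decode_int32 bz_data out) := by unfold Spec_decode_int32; infer_instance

-- ===== CLAIM (what is proved, stated in full; the proofs are below) =====
def Claim_equal_decode_int32 : Prop := ∀ (bz_data : List Int), Dom_decode_int32 bz_data → Spec_decode_int32 bz_data (decode_int32 bz_data)

-- ===== LEMMAS AND PROOFS =====

-- value of the digit string, most significant first
def pvHorner : List Int → Int
  | [] => 0
  | x :: xs => (x - 64) * 64 ^ xs.length + pvHorner xs

theorem pvHorner_foldl (xs : List Int) (a : Int) :
    xs.foldl (fun i d => i * 64 + (d - 64)) a = a * 64 ^ xs.length + pvHorner xs := by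
  induction xs generalizing a with
  | nil => simp [pvHorner]
  | cons x xs ih =>
    simp only [List.foldl_cons, ih, pvHorner, List.length_cons]
    ring

theorem pvFoldrA (xs : List Int) (i j : Int) (hj : 0 ≤ j) :
    xs.foldr (fun d (st : Int × Int) =>
        (st.1 + (if st.2 > 0 then (d - 64) * 64 ^ st.2.toNat else d - 64), st.2 + 1)) (i, j)
      = (i + pvHorner xs * 64 ^ j.toNat, j + xs.length) := by
  induction xs with
  | nil => simp [pvHorner]
  | cons x xs ih =>
    simp only [List.foldr_cons, ih, pvHorner, Prod.mk.injEq]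
    constructor
    · have hlen : (j + (xs.length : Int)).toNat = j.toNat + xs.length := by omega
      split_ifs with h
      · rw [hlen]; ring
      · have hz : j + (xs.length : Int) = 0 := by omega
        have hj0 : j = 0 := by omega
        have hx0 : xs.length = 0 := by omega
        simp [hj0, hx0]
        ring
    · simp only [List.length_cons]
      push_cast
      ring

-- the reversed index loop of A reads exactly bz_data back to front
theorem pvBridge (xs : List Int) (s : Int × Int) :
    (PySem.List.pyRange 0 (xs.length : Int) 1).reverse.foldl
      (fun (st : Int × Int) k =>
        let x := PySem.List.pyGetD xs k 0 - 64
        let x := if st.2 > 0 then x * 64 ^ st.2.toNat else x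
        (st.1 + x, st.2 + 1)) s
    = xs.foldr (fun d (st : Int × Int) =>
        (st.1 + (if st.2 > 0 then (d - 64) * 64 ^ st.2.toNat else d - 64), st.2 + 1)) s := by
  rw [List.foldl_reverse]
  conv_rhs => rw [← PySem.List.map_pyGetD_pyRange_zero' xs 0, List.foldr_map]

-- ===== VERDICT (by name: the statement is the Claim_ definition above) =====
theorem decode_int32_spec : Claim_equal_decode_int32 := by
  intro bz_data _
  show decode_int32 bz_data = decode_int32_alt bz_data
  unfold decode_int32 decode_int32_alt
  rw [show PySem.List.pyRange ((bz_data.length : Int) - 1) (-1) (-1)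
        = (PySem.List.pyRange 0 (bz_data.length : Int) 1).reverse by
      rw [PySem.List.pyRange_neg_one_eq_reverse]; norm_num]
  rw [pvBridge bz_data (0, 0)]
  rw [pvFoldrA bz_data 0 0 le_rfl, pvHorner_foldl bz_data 0]
  simp
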